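-- pv_equiv track=rewrite | github.com/jengel3/PythonSkype | commands/hangman.py | replace_all_except
-- ===== SOURCE A (Python) =====
-- full = "    0000000000000\n0           0\n0           1\n0          1 1\n0           1\n0          324\n0         " \
--        "3 2 4\n0        3  2  4\n0          5 6\n0         5   6\n0        5     6\n0       5       6\n0\n0\n0"
--
-- def replace_all_except(noreplace):
--     temp = 0
--     temp_message = full
--     while temp <= 6:
--         if temp in noreplace:
--             temp += 1
--             continue
--         temp_message = temp_message.replace(str(temp), '')
--         temp += 1
--     return temp_message
-- ===== SOURCE B (Python) =====
-- full = "    0000000000000\n0           0\n0           1\n0          1 1\n0           1\n0          324\n0         " \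
--        "3 2 4\n0        3  2  4\n0          5 6\n0         5   6\n0        5     6\n0       5       6\n0\n0\n0"
--
-- def replace_all_except(noreplace):
--     # single filtering pass: drop each digit character unless its value is kept
--     return ''.join(c for c in full if not (c.isdigit() and int(c) not in noreplace))
-- ===== Notes on version B (the rewrite author's own statement) =====
-- stated objective: simpler
-- what changed: Replaces the while-loop of seven whole-string str.replace scans (one per digit 0..6) with a single filtering pass over the characters of the fixed string, keeping a character unless it is a digit whose value is not in noreplace.
import Mathlib
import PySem

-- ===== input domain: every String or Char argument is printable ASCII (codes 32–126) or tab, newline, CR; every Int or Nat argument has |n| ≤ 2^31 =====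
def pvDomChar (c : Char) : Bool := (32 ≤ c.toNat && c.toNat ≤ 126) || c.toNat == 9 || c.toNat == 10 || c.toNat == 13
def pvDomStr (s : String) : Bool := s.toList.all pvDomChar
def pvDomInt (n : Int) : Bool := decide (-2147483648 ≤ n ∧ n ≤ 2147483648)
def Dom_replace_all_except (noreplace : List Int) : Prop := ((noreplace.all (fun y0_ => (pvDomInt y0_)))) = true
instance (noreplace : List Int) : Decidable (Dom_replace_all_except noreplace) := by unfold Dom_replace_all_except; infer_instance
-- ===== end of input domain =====

-- B replaces A's seven whole-string str.replace scans (one per digit 0..6) by a single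
-- filtering pass over the characters of the fixed string (objective: simpler).

-- the module-level constant `full`
def pvFull : String := "    0000000000000\n0           0\n0           1\n0          1 1\n0           1\n0          324\n0         3 2 4\n0        3  2  4\n0          5 6\n0         5   6\n0        5     6\n0       5       6\n0\n0\n0"

-- ===== PORT A =====
-- while temp <= 6 with temp starting at 0 ≡ a fold over range(0, 7)
def replace_all_except (noreplace : List Int) : String :=
  (PySem.List.pyRange 0 7 1).foldl
    (fun temp_message temp =>
      if noreplace.contains temp then temp_message
      else PySem.Str.replace temp_message (PySem.Int.toStr temp) "")
    pvFull

-- ===== PORT B =====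
-- ''.join(c for c in full if not (c.isdigit() and int(c) not in noreplace));
-- int(c) for a digit character c is exactly (c.toNat : Int) - 48
def replace_all_except_alt (noreplace : List Int) : String :=
  String.ofList (pvFull.toList.filter
    (fun c => !(PySem.Chars.isdigit c && !(noreplace.contains ((c.toNat : Int) - 48)))))

-- ===== PRECONDITION & SPEC =====
def Spec_replace_all_except (noreplace : List Int) (out : String) : Prop := out = replace_all_except_alt noreplace
instance (noreplace : List Int) (out : String) : Decidable (Spec_replace_all_except noreplace out) := by unfold Spec_replace_all_except; infer_instance

-- ===== CLAIM (what is proved, stated in full; the proofs are below) =====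
def Claim_equal_replace_all_except : Prop := ∀ (noreplace : List Int), Dom_replace_all_except noreplace → Spec_replace_all_except noreplace (replace_all_except noreplace)

-- ===== LEMMAS AND PROOFS =====

-- the single character of str(t) for t in 0..6
def dChar (t : Int) : Char := ((PySem.Int.toStr t).toList).headD ' '

-- replace.go with a one-character pattern and empty replacement is a filter
theorem go_single (d : Char) : ∀ (fuel : Nat) (l acc : List Char), l.length ≤ fuel →
    PySem.Chars.replace.go [d] [] fuel l acc = acc.reverse ++ l.filter (fun x => !(x == d)) := by
  intro fuel
  induction fuel with
  | zero =>
    intro l acc h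
    have : l = [] := List.eq_nil_of_length_eq_zero (Nat.le_zero.mp h)
    subst this
    simp [PySem.Chars.replace.go]
  | succ n ih =>
    intro l acc h
    cases l with
    | nil => simp [PySem.Chars.replace.go]
    | cons c t =>
      have ht : t.length ≤ n := by simpa using h
      by_cases hd : d = c
      · subst hd
        simp [PySem.Chars.replace.go, List.isPrefixOf, ih t acc ht]
      · have hdb : (d == c) = false := by simp [hd]
        have hbc : (c == d) = false := by simp [Ne.symm hd]
        simp [PySem.Chars.replace.go, List.isPrefixOf, hdb, ih t (c :: acc) ht, hbc]

theorem replace_single (d : Char) (cs : List Char) :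
    PySem.Chars.replace cs [d] [] = cs.filter (fun x => !(x == d)) := by
  simpa [PySem.Chars.replace] using go_single d cs.length cs [] (le_refl _)

theorem pvRangeEval : PySem.List.pyRange 0 7 1 = [0, 1, 2, 3, 4, 5, 6] := by decide

-- A's fold of single-character replaces, seen on character lists, is one combined filter
theorem fold_toList (nr : List Int) : ∀ (ts : List Int),
    (∀ t ∈ ts, (PySem.Int.toStr t).toList = [dChar t]) → ∀ (s : String),
    (ts.foldl (fun m t => if nr.contains t then m else PySem.Str.replace m (PySem.Int.toStr t) "") s).toList
    = s.toList.filter (fun c => ts.all (fun t => nr.contains t || !(c == dChar t))) := by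
  intro ts
  induction ts with
  | nil => intro _ s; simp
  | cons t ts ih =>
    intro h s
    have ht : (PySem.Int.toStr t).toList = [dChar t] := h t (by simp)
    simp only [List.foldl_cons]
    rw [ih (fun u hu => h u (by simp [hu]))]
    by_cases hc : nr.contains t = true
    · have hm : t ∈ nr := by simpa using hc
      rw [if_pos hc]
      refine List.filter_congr ?_
      intro c _
      simp [hm]
    · have hm : t ∉ nr := by simpa using hc
      rw [if_neg hc]
      rw [show (PySem.Str.replace s (PySem.Int.toStr t) "").toList
            = PySem.Chars.replace s.toList [dChar t] [] by
        rw [PySem.Str.toList_replace, ht]; rfl]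
      rw [replace_single, List.filter_filter]
      refine List.filter_congr ?_
      intro c _
      simp [hm, Bool.and_comm]

-- ===== VERDICT (by name: the statement is the Claim_ definition above) =====
set_option maxRecDepth 100000 in
theorem replace_all_except_spec : Claim_equal_replace_all_except := by
  intro nr _
  unfold Spec_replace_all_except
  have hA : (replace_all_except nr).toList
      = pvFull.toList.filter (fun c => ([0,1,2,3,4,5,6] : List Int).all (fun t => nr.contains t || !(c == dChar t))) := by
    unfold replace_all_except
    rw [pvRangeEval]
    exact fold_toList nr [0,1,2,3,4,5,6] (by decide) pvFull
  have hB : (replace_all_except_alt nr).toList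
      = pvFull.toList.filter (fun c => !(PySem.Chars.isdigit c && !(nr.contains ((c.toNat : Int) - 48)))) := by
    unfold replace_all_except_alt
    simp
  have hmemb : pvFull.toList.all (fun c => c ∈ ([' ', '\n', '0','1','2','3','4','5','6'] : List Char)) = true := by rfl
  have hmem : ∀ c ∈ pvFull.toList, c ∈ ([' ', '\n', '0','1','2','3','4','5','6'] : List Char) := by
    intro c hc
    exact of_decide_eq_true ((List.all_eq_true.mp hmemb) c hc)
  have hpred : ∀ c ∈ ([' ', '\n', '0','1','2','3','4','5','6'] : List Char),
      (([0,1,2,3,4,5,6] : List Int).all (fun t => nr.contains t || !(c == dChar t)))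
      = (!(PySem.Chars.isdigit c && !(nr.contains ((c.toNat : Int) - 48)))) := by
    intro c hc
    fin_cases hc <;>
      simp [PySem.Chars.isdigit,
        show dChar 0 = '0' from by decide, show dChar 1 = '1' from by decide,
        show dChar 2 = '2' from by decide, show dChar 3 = '3' from by decide,
        show dChar 4 = '4' from by decide, show dChar 5 = '5' from by decide,
        show dChar 6 = '6' from by decide]
  have : (replace_all_except nr).toList = (replace_all_except_alt nr).toList := by
    rw [hA, hB]
    exact List.filter_congr (fun c hcm => hpred c (hmem c hcm))
  have h2 := congrArg String.ofList this
  simpa using h2
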